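-- pv_equiv track=rewrite | github.com/ReleasedBlock33YT/PartLang | partlang/partlangbackend.py | splitStatement
-- ===== SOURCE A (Python) =====
-- def splitStatement(statement, operators):
-- 	for op in sorted(operators, key=len, reverse=True):
-- 		if op in statement:
-- 			parts = statement.split(op, 1)
-- 			lstatement = parts[0].strip()
-- 			rstatement = parts[1].strip()
-- 			return lstatement, rstatement, op
-- 	return statement.strip(), None, None
-- ===== SOURCE B (Python) =====
-- def splitStatement(statement, operators):
-- 	present = [op for op in operators if op in statement]
-- 	if not present:
-- 		return statement.strip(), None, None
-- 	op = max(present, key=len)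
-- 	parts = statement.split(op, 1)
-- 	return parts[0].strip(), parts[1].strip(), op
-- ===== Notes on version B (the rewrite author's own statement) =====
-- stated objective: simpler
-- what changed: Replaces the sort-then-scan loop (sort all operators by length descending, return at the first substring hit) by a filter-then-reduce decomposition: one comprehension collects the operators present in the statement, max(key=len) picks the longest (first maximal on ties, matching the stable sort's tie-break), then one split; no sort, flat code, but no early exit, so B is slower on very large operator lists.
import Mathlib
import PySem

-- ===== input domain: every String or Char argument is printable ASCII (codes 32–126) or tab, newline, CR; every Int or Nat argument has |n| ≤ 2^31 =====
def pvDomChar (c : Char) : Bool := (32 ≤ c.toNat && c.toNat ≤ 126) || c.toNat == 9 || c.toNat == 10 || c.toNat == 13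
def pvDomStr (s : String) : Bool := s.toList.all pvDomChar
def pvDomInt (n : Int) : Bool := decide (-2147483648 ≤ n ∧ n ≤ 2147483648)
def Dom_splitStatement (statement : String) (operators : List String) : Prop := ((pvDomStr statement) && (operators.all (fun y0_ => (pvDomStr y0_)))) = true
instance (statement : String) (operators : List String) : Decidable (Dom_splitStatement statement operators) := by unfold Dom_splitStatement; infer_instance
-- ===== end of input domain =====

-- B replaces A's sort-then-scan (sort operators by length descending, return at the first
-- substring hit) by a filter-then-reduce decomposition: collect the operators present in the
-- statement, take the longest with max(key=len) (first maximal on ties, like A's stable sort),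
-- then split once; objective: simpler (no sort, flat code).

-- ===== PORT A =====
-- the 'for op in sorted(operators, key=len, reverse=True)' loop: try each operator in that
-- order, return at the first substring hit
def splitStatementGo (statement : String) : List String → String × Option String × Option String
  | [] => (PySem.Str.strip statement, none, none)
  | op :: rest =>
    if PySem.Str.isIn op statement then
      match PySem.Str.splitMax? statement op 1 with
      | some parts =>
          (PySem.Str.strip (PySem.List.pyGetD parts 0 ""),
           some (PySem.Str.strip (PySem.List.pyGetD parts 1 "")),
           some op)
      | none => (PySem.Str.strip statement, none, none)  -- op = "": Python raises ValueError; excluded by Pre_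
    else splitStatementGo statement rest

def splitStatement (statement : String) (operators : List String) : String × Option String × Option String :=
  splitStatementGo statement (PySem.List.sorted operators (fun op => PySem.Str.len op) true)

-- ===== PORT B =====
def splitStatement_alt (statement : String) (operators : List String) : String × Option String × Option String :=
  let present := operators.filter (fun op => PySem.Str.isIn op statement)
  match PySem.List.max? present (fun op => PySem.Str.len op) with
  | none => (PySem.Str.strip statement, none, none)
  | some op =>
    match PySem.Str.splitMax? statement op 1 with
    | some parts =>
        (PySem.Str.strip (PySem.List.pyGetD parts 0 ""),
         some (PySem.Str.strip (PySem.List.pyGetD parts 1 "")),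
         some op)
    | none => (PySem.Str.strip statement, none, none)  -- op = "": Python raises ValueError; excluded by Pre_

-- ===== PRECONDITION & SPEC =====
-- Pre_ excludes exactly the inputs on which Python A raises ValueError: '' is one of the
-- operators and no non-empty operator occurs in the statement, so str.split is called with an
-- empty separator. Python B raises the same ValueError on exactly those inputs.
def Pre_splitStatement (statement : String) (operators : List String) : Prop :=
  ¬ ("" ∈ operators ∧ ∀ op ∈ operators, PySem.Str.isIn op statement = true → op = "")
instance (statement : String) (operators : List String) : Decidable (Pre_splitStatement statement operators) := by unfold Pre_splitStatement; infer_instance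

def pvWitness_splitStatement : String × List String := ("1 + 2", ["+", "-"])

def Spec_splitStatement (statement : String) (operators : List String) (out : String × Option String × Option String) : Prop := out = splitStatement_alt statement operators
instance (statement : String) (operators : List String) (out : String × Option String × Option String) : Decidable (Spec_splitStatement statement operators out) := by unfold Spec_splitStatement; infer_instance

-- ===== CLAIM (what is proved, stated in full; the proofs are below) =====
def Claim_equal_splitStatement : Prop := ∀ (statement : String) (operators : List String), Dom_splitStatement statement operators → Pre_splitStatement statement operators → Spec_splitStatement statement operators (splitStatement statement operators)

-- ===== LEMMAS AND PROOFS =====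

-- inserting x into a list whose keys are non-increasing: the first p-element of the result is
-- the max?-style combination of x with the first p-element of the old list
theorem find?_insertBy_rev {α : Type} (p : α → Bool) (key : α → Int) (x : α) :
    ∀ (acc : List α), acc.Pairwise (fun a b => key b ≤ key a) →
    (PySem.List.insertBy (fun a b => decide (key b < key a)) x acc).find? p =
      (if p x then
        match acc.find? p with
        | none => some x
        | some m => if key m < key x then some x else some m
       else acc.find? p) := by
  intro acc
  induction acc with
  | nil =>
    intro _
    cases hpx : p x <;> simp [PySem.List.insertBy, List.find?, hpx]
  | cons y ys ih =>
    intro hpw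
    have hpw' := (List.pairwise_cons.mp hpw).2
    have hyle := (List.pairwise_cons.mp hpw).1
    by_cases hlt : key y < key x
    · simp only [PySem.List.insertBy, hlt, decide_true, if_true]
      cases hpx : p x
      · simp [List.find?, hpx]
      · rw [List.find?_cons_of_pos hpx]
        simp only [if_true]
        cases hfind : (y :: ys).find? p
        · rfl
        · rename_i m
          have hm : m ∈ y :: ys := List.mem_of_find?_eq_some hfind
          have hmle : key m ≤ key y := by
            rcases List.mem_cons.mp hm with h | h
            · exact le_of_eq (by rw [h])
            · exact hyle m h
          simp [lt_of_le_of_lt hmle hlt]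
    · simp only [PySem.List.insertBy, hlt, decide_false, Bool.false_eq_true, if_false]
      cases hpy : p y
      · rw [List.find?_cons_of_neg (by simp [hpy]), List.find?_cons_of_neg (by simp [hpy])]
        exact ih hpw'
      · rw [List.find?_cons_of_pos hpy, List.find?_cons_of_pos hpy]
        cases hpx : p x <;> simp [hlt]

-- the running-max fold step over an appended element
theorem max?_append_singleton {α : Type} (key : α → Int) (l : List α) (x : α) :
    PySem.List.max? (l ++ [x]) key =
      (match PySem.List.max? l key with
       | none => some x
       | some m => if key m < key x then some x else some m) := by
  simp only [PySem.List.max?, List.foldl_append, List.foldl_cons, List.foldl_nil]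
  cases List.foldl (fun acc x =>
      match acc with
      | none => some x
      | some m => if key m < key x then some x else some m) none l <;> rfl

-- first hit in the stable length-descending sort = first longest element of the filter
theorem find?_sorted_eq_max?_filter (p : String → Bool) :
    ∀ (xs : List String),
    (PySem.List.sorted xs (fun op => PySem.Str.len op) true).find? p =
      PySem.List.max? (xs.filter p) (fun op => PySem.Str.len op) := by
  intro xs
  induction xs using List.reverseRecOn with
  | nil => simp [PySem.List.sorted, PySem.List.max?]
  | append_singleton xs x ih =>
    have hsort : PySem.List.sorted (xs ++ [x]) (fun op => PySem.Str.len op) true =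
        PySem.List.insertBy (fun a b => decide (PySem.Str.len b < PySem.Str.len a)) x
          (PySem.List.sorted xs (fun op => PySem.Str.len op) true) := by
      rw [PySem.List.sorted_rev_eq_foldl_insertBy, PySem.List.sorted_rev_eq_foldl_insertBy,
        List.foldl_append]
      simp
    rw [hsort,
      find?_insertBy_rev p (fun op => PySem.Str.len op) x _
        (PySem.List.sorted_pairwise_rev xs (fun op => PySem.Str.len op)),
      ih, List.filter_append]
    cases hpx : p x
    · simp [hpx]
    · simp only [List.filter, hpx]
      rw [max?_append_singleton, if_pos trivial]

-- A's loop is 'find? the first matching operator, then split on it'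
theorem splitStatementGo_eq_find? (statement : String) (l : List String) :
    splitStatementGo statement l =
      (match l.find? (fun op => PySem.Str.isIn op statement) with
       | none => (PySem.Str.strip statement, none, none)
       | some op =>
         match PySem.Str.splitMax? statement op 1 with
         | some parts =>
             (PySem.Str.strip (PySem.List.pyGetD parts 0 ""),
              some (PySem.Str.strip (PySem.List.pyGetD parts 1 "")),
              some op)
         | none => (PySem.Str.strip statement, none, none)) := by
  induction l with
  | nil => rfl
  | cons op rest ih =>
    simp only [List.find?_cons]
    cases h : PySem.Str.isIn op statement
    · simp only [splitStatementGo, h, Bool.false_eq_true, if_false]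
      exact ih
    · simp only [splitStatementGo, h, if_true]

-- ===== VERDICT (by name: the statement is the Claim_ definition above) =====
theorem splitStatement_spec : Claim_equal_splitStatement := by
  intro statement operators _ _
  unfold Spec_splitStatement splitStatement splitStatement_alt
  rw [splitStatementGo_eq_find?,
    find?_sorted_eq_max?_filter (fun op => PySem.Str.isIn op statement) operators]
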